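-- pv_equiv track=rewrite | github.com/tsinghua-auto4/ct_note | BOJ/2306/26/김동현_17144_미세먼지 안녕!.py | solution
-- ===== SOURCE A (Python) =====
-- def diffusion(R: int, C: int, target:list[list], purifier: list):
--     graph = [[0]*C for _ in range(R)]
--     graph[purifier[0][0]][purifier[0][1]] = -1
--     graph[purifier[1][0]][purifier[1][1]] = -1
--
--     for cr in range(R):
--         for cc in range(C):
--             if target[cr][cc] <= 0:
--                 continue
--             diffuse = target[cr][cc]//5
--             grid    = 0
--             for dr, dc in [(-1, 0), (1, 0), (0, -1), (0, 1)]: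
--                 nr, nc = cr+dr, cc+dc
--                 if not (0 <= nr < R and 0 <= nc < C):
--                     continue
--                 if (nr, nc) in purifier:
--                     continue
--                 graph[nr][nc] += diffuse
--                 grid += 1
--             graph[cr][cc] += (target[cr][cc] - diffuse*grid)
--     for r in range(R):
--         for c in range(C):
--             target[r][c] = graph[r][c]
--
-- def purify(R: int, C: int, target:list[list], purifier: list):
--     dr = [-1,0,1,0]
--     dc = [0,1,0,-1]
--     # 위쪽 반시계 방향 기류
--     direction = 1
--     past = 0
--     cr, cc = purifier[0][0], 1
--     while True:
--         nr, nc = cr+dr[direction], cc+dc[direction]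
--         if nr == R or nc == C or nr == -1 or nc == -1:
--             direction = (direction-1)%4
--             continue
--         if cr == purifier[0][0] and cc == 0:
--             break
--         target[cr][cc], past  = past, target[cr][cc]
--         cr, cc = nr, nc
--
--     # 아래쪽 시계방향 기류
--     direction = 1
--     past = 0
--     cr, cc = purifier[1][0], 1
--     while True:
--         nr, nc = cr+dr[direction], cc+dc[direction]
--         if nr == R or nc == C or nr == -1 or nc == -1:
--             direction = (direction+1)%4
--             continue
--         if cr == purifier[1][0] and cc == 0:
--             break
--         target[cr][cc], past  = past, target[cr][cc]
--         cr, cc = nr, nc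
--
-- def solution(R: int, C: int, T: int, target:list[list], purifier: list):
--     # T번 반복
--     for _ in range(T):
--         # 1. 먼지 확산
--         diffusion(R, C, target, purifier)
--         # 2. 공기 청정기 동작
--         purify(R, C, target, purifier)
--
--     # 미세먼지의 양 계산
--     ans = 2
--     for idx in range(R):
--         ans += sum(target[idx])
--
--     return ans
-- ===== SOURCE B (Python) =====
-- # B: diffusion rebuilt as a fresh-grid scatter without A's dead tuple-vs-list purifier test;
-- # purification rewritten as bulk shifts along explicitly constructed ring paths (no direction
-- # state machine).  Equivalence is about the RETURN value only: A mutates `target` in place, B does not.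
--
-- def _diffuse(R, C, grid, p0, p1):
--     new = [[0] * C for _ in range(R)]
--     new[p0[0]][p0[1]] = -1
--     new[p1[0]][p1[1]] = -1
--     for r in range(R):
--         for c in range(C):
--             v = grid[r][c]
--             if v > 0:
--                 d = v // 5
--                 nbrs = [(r + a, c + b) for a, b in ((-1, 0), (1, 0), (0, -1), (0, 1))
--                         if 0 <= r + a < R and 0 <= c + b < C]
--                 for nr, nc in nbrs:
--                     new[nr][nc] += d
--                 new[r][c] += v - d * len(nbrs)
--     return new
--
--
-- def _ring_up(R, C, r0):
--     # counterclockwise ring of the upper region (rows 0..r0), in shift order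
--     return ([(r0, c) for c in range(1, C)]
--             + [(r, C - 1) for r in range(r0 - 1, -1, -1)]
--             + [(0, c) for c in range(C - 2, -1, -1)]
--             + [(r, 0) for r in range(1, r0)])
--
--
-- def _ring_down(R, C, r1):
--     # clockwise ring of the lower region (rows r1..R-1), in shift order
--     return ([(r1, c) for c in range(1, C)]
--             + [(r, C - 1) for r in range(r1 + 1, R)]
--             + [(R - 1, c) for c in range(C - 2, -1, -1)]
--             + [(r, 0) for r in range(R - 2, r1, -1)])
--
--
-- def _shift(grid, cells):
--     # slide every value one place forward along `cells`, feed 0 in at the front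
--     vals = [0] + [grid[r][c] for r, c in cells[:-1]]
--     for (r, c), v in zip(cells, vals):
--         grid[r][c] = v
--
--
-- def solution(R, C, T, target, purifier):
--     grid = [row[:] for row in target]
--     for _ in range(T):
--         p0, p1 = purifier[0], purifier[1]
--         grid = _diffuse(R, C, grid, p0, p1)
--         _shift(grid, _ring_up(R, C, p0[0]))
--         _shift(grid, _ring_down(R, C, p1[0]))
--     return 2 + sum(sum(grid[r]) for r in range(R))
-- ===== Notes on version B (the rewrite author's own statement) =====
-- stated objective: alternative
-- what changed: The air-purifier step is rewritten from A's cell-by-cell while-loop walk with a direction state machine into bulk shifts along explicitly constructed ring paths (values precomputed from the pre-step grid, then written in one pass), and diffusion builds the fresh grid without A's dead tuple-vs-list purifier membership test; equivalence is about the return value only (A mutates target in place, B does not).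
-- outside the precondition, e.g. on solution(3, 3, 1, [[0, 10, 0], [-1, 0, 0], [0, 0, 0]], [[0, 0], [1, 0]]): A returns 10, B returns 13; on solution(4, 2, 1, [[1, 2, 30], [3, 4], [5, 6], [7, 8]], [[1, 0], [2, 0]]): A returns 58, B returns 28
import Mathlib
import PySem

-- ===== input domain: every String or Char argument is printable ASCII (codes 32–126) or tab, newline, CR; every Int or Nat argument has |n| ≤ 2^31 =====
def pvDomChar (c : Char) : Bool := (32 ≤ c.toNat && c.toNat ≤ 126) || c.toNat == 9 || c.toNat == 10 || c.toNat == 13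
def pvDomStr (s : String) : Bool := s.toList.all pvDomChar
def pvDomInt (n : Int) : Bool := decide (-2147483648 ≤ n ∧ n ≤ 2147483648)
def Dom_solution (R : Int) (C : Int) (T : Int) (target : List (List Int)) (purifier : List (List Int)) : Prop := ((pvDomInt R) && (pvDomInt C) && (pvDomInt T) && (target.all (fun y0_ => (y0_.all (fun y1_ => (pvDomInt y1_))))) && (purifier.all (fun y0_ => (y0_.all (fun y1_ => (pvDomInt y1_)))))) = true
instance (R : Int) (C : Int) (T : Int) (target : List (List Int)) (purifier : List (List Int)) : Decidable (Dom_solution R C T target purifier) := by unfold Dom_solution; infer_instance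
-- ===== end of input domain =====

-- B rewrites the purifier step as bulk shifts along explicitly built ring paths (A walks the
-- rings cell by cell with a direction state machine); equivalence is about the RETURN value
-- only: the Python A mutates `target` in place, B does not.

-- ===== PORT A =====

-- grid[r][c]  (total form of Python's double indexing; every use below is guarded in range by Pre_)
def gget (g : List (List Int)) (r c : Int) : Int :=
  PySem.List.pyGetD (PySem.List.pyGetD g r []) c 0

-- grid[r][c] = v
def gset (g : List (List Int)) (r c : Int) (v : Int) : List (List Int) :=
  PySem.List.pySetD g r (PySem.List.pySetD (PySem.List.pyGetD g r []) c v)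

-- Python's `(nr, nc) in purifier` compares a tuple with lists: `==` between a tuple and a
-- list is always False in Python, so the element test is constantly false (ported exactly).
def pyTupleEqList (_p : Int × Int) (_q : List Int) : Bool := false

-- dr = [-1,0,1,0]; dc = [0,1,0,-1]
def pvDr : List Int := [-1, 0, 1, 0]
def pvDc : List Int := [0, 1, 0, -1]

-- def diffusion(R, C, target, purifier): ...  (returns the new value of `target`)
def diffusionA (R C : Int) (target : List (List Int)) (purifier : List (List Int)) :
    List (List Int) :=
  let graph := (PySem.List.pyRange 0 R 1).map (fun _ => List.replicate C.toNat (0 : Int))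
  let p0 := PySem.List.pyGetD purifier 0 []
  let p1 := PySem.List.pyGetD purifier 1 []
  let graph := gset graph (PySem.List.pyGetD p0 0 0) (PySem.List.pyGetD p0 1 0) (-1)
  let graph := gset graph (PySem.List.pyGetD p1 0 0) (PySem.List.pyGetD p1 1 0) (-1)
  let graph :=
    (PySem.List.pyRange 0 R 1).foldl (fun graph cr =>
      (PySem.List.pyRange 0 C 1).foldl (fun graph cc =>
        if gget target cr cc ≤ 0 then graph
        else
          let diffuse := PySem.Int.floordiv (gget target cr cc) 5
          let st :=
            [((-1 : Int), (0 : Int)), (1, 0), (0, -1), (0, 1)].foldl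
              (fun (st : List (List Int) × Int) d =>
                let nr := cr + d.1
                let nc := cc + d.2
                if ¬ (0 ≤ nr ∧ nr < R ∧ 0 ≤ nc ∧ nc < C) then st
                else if purifier.any (pyTupleEqList (nr, nc)) then st
                else (gset st.1 nr nc (gget st.1 nr nc + diffuse), st.2 + 1))
              (graph, 0)
          gset st.1 cr cc (gget st.1 cr cc + (gget target cr cc - diffuse * st.2)))
        graph)
      graph
  -- for r in range(R): for c in range(C): target[r][c] = graph[r][c]
  (PySem.List.pyRange 0 R 1).foldl (fun t r =>
    (PySem.List.pyRange 0 C 1).foldl (fun t c => gset t r c (gget graph r c)) t) target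

-- the `while True` walk of purify; both while-loops of A are this code, differing only in the
-- turning sign `turn` ((direction-1)%4 above the purifier, (direction+1)%4 below) and the row
-- `brink` of the break test.  `fuel` bounds the number of iterations; on every input admitted
-- by Pre_ the Python loop breaks after at most 2*(R+C)+8 iterations, so the fuel never runs out.
def pvWalk (R C brink turn : Int) :
    Nat → List (List Int) → Int → Int → Int → Int → List (List Int)
  | 0, g, _, _, _, _ => g
  | (fuel + 1), g, cr, cc, dir, past =>
    let nr := cr + PySem.List.pyGetD pvDr dir 0
    let nc := cc + PySem.List.pyGetD pvDc dir 0
    if nr = R ∨ nc = C ∨ nr = -1 ∨ nc = -1 then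
      pvWalk R C brink turn fuel g cr cc (PySem.Int.mod (dir + turn) 4) past
    else if cr = brink ∧ cc = 0 then g
    else pvWalk R C brink turn fuel (gset g cr cc past) nr nc dir (gget g cr cc)

def pvFuel (R C : Int) : Nat := (2 * (R + C)).toNat + 8

-- def purify(R, C, target, purifier): ...  (returns the new value of `target`)
def purifyA (R C : Int) (target : List (List Int)) (purifier : List (List Int)) :
    List (List Int) :=
  let r0 := PySem.List.pyGetD (PySem.List.pyGetD purifier 0 []) 0 0
  let r1 := PySem.List.pyGetD (PySem.List.pyGetD purifier 1 []) 0 0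
  let g1 := pvWalk R C r0 (-1) (pvFuel R C) target r0 1 1 0
  pvWalk R C r1 1 (pvFuel R C) g1 r1 1 1 0

def solution (R : Int) (C : Int) (T : Int) (target : List (List Int)) (purifier : List (List Int)) : Int :=
  let final :=
    (PySem.List.pyRange 0 T 1).foldl
      (fun g _ => purifyA R C (diffusionA R C g purifier) purifier) target
  (PySem.List.pyRange 0 R 1).foldl
    (fun ans idx => ans + (PySem.List.pyGetD final idx []).sum) 2

-- ===== PORT B =====

-- def _diffuse(R, C, grid, p0, p1): ...
def diffuseB (R C : Int) (grid : List (List Int)) (p0 p1 : List Int) : List (List Int) :=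
  let new := (PySem.List.pyRange 0 R 1).map (fun _ => List.replicate C.toNat (0 : Int))
  let new := gset new (PySem.List.pyGetD p0 0 0) (PySem.List.pyGetD p0 1 0) (-1)
  let new := gset new (PySem.List.pyGetD p1 0 0) (PySem.List.pyGetD p1 1 0) (-1)
  (PySem.List.pyRange 0 R 1).foldl (fun new r =>
    (PySem.List.pyRange 0 C 1).foldl (fun new c =>
      let v := gget grid r c
      if v > 0 then
        let d := PySem.Int.floordiv v 5
        let nbrs :=
          ([((-1 : Int), (0 : Int)), (1, 0), (0, -1), (0, 1)].filter
              (fun ab => decide (0 ≤ r + ab.1 ∧ r + ab.1 < R ∧ 0 ≤ c + ab.2 ∧ c + ab.2 < C))).map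
            (fun ab => (r + ab.1, c + ab.2))
        let new2 := nbrs.foldl (fun g rc => gset g rc.1 rc.2 (gget g rc.1 rc.2 + d)) new
        gset new2 r c (gget new2 r c + (v - d * (nbrs.length : Int)))
      else new)
      new)
    new

-- def _ring_up(R, C, r0): ...
def ringUp (R C r0 : Int) : List (Int × Int) :=
  ((PySem.List.pyRange 1 C 1).map (fun c => (r0, c)))
    ++ ((PySem.List.pyRange (r0 - 1) (-1) (-1)).map (fun r => (r, C - 1)))
    ++ ((PySem.List.pyRange (C - 2) (-1) (-1)).map (fun c => ((0 : Int), c)))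
    ++ ((PySem.List.pyRange 1 r0 1).map (fun r => (r, (0 : Int))))

-- def _ring_down(R, C, r1): ...
def ringDown (R C r1 : Int) : List (Int × Int) :=
  ((PySem.List.pyRange 1 C 1).map (fun c => (r1, c)))
    ++ ((PySem.List.pyRange (r1 + 1) R 1).map (fun r => (r, C - 1)))
    ++ ((PySem.List.pyRange (C - 2) (-1) (-1)).map (fun c => (R - 1, c)))
    ++ ((PySem.List.pyRange (R - 2) r1 (-1)).map (fun r => (r, (0 : Int))))

-- def _shift(grid, cells): vals = [0] + [grid[r][c] for r, c in cells[:-1]]; then assign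
def shiftB (grid : List (List Int)) (cells : List (Int × Int)) : List (List Int) :=
  let vals := (0 : Int) :: cells.dropLast.map (fun rc => gget grid rc.1 rc.2)
  (cells.zip vals).foldl (fun g p => gset g p.1.1 p.1.2 p.2) grid

def solution_alt (R : Int) (C : Int) (T : Int) (target : List (List Int)) (purifier : List (List Int)) : Int :=
  let grid0 := target.map (fun row => row)
  let final :=
    (PySem.List.pyRange 0 T 1).foldl
      (fun g _ =>
        let p0 := PySem.List.pyGetD purifier 0 []
        let p1 := PySem.List.pyGetD purifier 1 []
        shiftB
          (shiftB (diffuseB R C g p0 p1) (ringUp R C (PySem.List.pyGetD p0 0 0)))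
          (ringDown R C (PySem.List.pyGetD p1 0 0)))
      grid0
  2 + ((PySem.List.pyRange 0 R 1).map (fun r => (PySem.List.pyGetD final r []).sum)).sum

-- ===== PRECONDITION & SPEC =====

-- Pre_ admits every input with T ≤ 0 on which A's final summation loop returns (R ≤ number of
-- rows), and, for simulated steps, the shapes on which the Python A returns normally and
-- deterministically by its stated algorithm: an R×C grid (C ≥ 2) and a purifier list whose
-- first two entries are in-range cells with the upper purifier row strictly below row 0 and the
-- lower one strictly above row R-1.  Excluded while A still returns: degenerate single-row
-- purifier regions (the walk doubles back over its own writes — an accident of A's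
-- implementation) and grids that are not exactly R×C (A's answer then depends on junk cells its
-- simulation never touches).
def Pre_solution (R : Int) (C : Int) (T : Int) (target : List (List Int)) (purifier : List (List Int)) : Prop :=
  (T ≤ 0 ∧ R ≤ (target.length : Int)) ∨
  ((target.length : Int) = R ∧ (∀ row ∈ target, (row.length : Int) = C) ∧ 2 ≤ C ∧
   2 ≤ purifier.length ∧
   2 ≤ (purifier.getD 0 []).length ∧ 2 ≤ (purifier.getD 1 []).length ∧
   1 ≤ (purifier.getD 0 []).getD 0 0 ∧ (purifier.getD 0 []).getD 0 0 < R ∧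
   0 ≤ (purifier.getD 1 []).getD 0 0 ∧ (purifier.getD 1 []).getD 0 0 ≤ R - 2 ∧
   0 ≤ (purifier.getD 0 []).getD 1 0 ∧ (purifier.getD 0 []).getD 1 0 < C ∧
   0 ≤ (purifier.getD 1 []).getD 1 0 ∧ (purifier.getD 1 []).getD 1 0 < C)

instance (R : Int) (C : Int) (T : Int) (target : List (List Int)) (purifier : List (List Int)) : Decidable (Pre_solution R C T target purifier) := by
  unfold Pre_solution; infer_instance

def pvWitness_solution : Int × Int × Int × List (List Int) × List (List Int) :=
  (4, 2, 1, [[0, 0], [0, 0], [0, 0], [0, 0]], [[1, 0], [2, 0]])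

def Spec_solution (R : Int) (C : Int) (T : Int) (target : List (List Int)) (purifier : List (List Int)) (out : Int) : Prop := out = solution_alt R C T target purifier
instance (R : Int) (C : Int) (T : Int) (target : List (List Int)) (purifier : List (List Int)) (out : Int) : Decidable (Spec_solution R C T target purifier out) := by unfold Spec_solution; infer_instance

-- ===== CLAIM (what is proved, stated in full; the proofs are below) =====
def Claim_equal_solution : Prop := ∀ (R : Int) (C : Int) (T : Int) (target : List (List Int)) (purifier : List (List Int)), Dom_solution R C T target purifier → Pre_solution R C T target purifier → Spec_solution R C T target purifier (solution R C T target purifier)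

-- ===== LEMMAS AND PROOFS =====

-- ---- basic grid facts ----

def pvShape (g : List (List Int)) (R C : Int) : Prop :=
  (g.length : Int) = R ∧ ∀ row ∈ g, (row.length : Int) = C

def pvInR (R C : Int) (p : Int × Int) : Prop :=
  0 ≤ p.1 ∧ p.1 < R ∧ 0 ≤ p.2 ∧ p.2 < C

theorem gget_nonneg (g : List (List Int)) (r c : Int) (hr : 0 ≤ r) (hc : 0 ≤ c) :
    gget g r c = (g.getD r.toNat []).getD c.toNat 0 := by
  unfold gget
  rw [show r = ((r.toNat : Nat) : Int) by omega, PySem.List.pyGetD_natCast,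
    show c = ((c.toNat : Nat) : Int) by omega, PySem.List.pyGetD_natCast]
  simp only [Int.toNat_natCast]

theorem gset_nonneg (g : List (List Int)) (r c v : Int) (hr : 0 ≤ r) (hc : 0 ≤ c) :
    gset g r c v = g.set r.toNat ((g.getD r.toNat []).set c.toNat v) := by
  unfold gset
  rw [PySem.List.pySetD_of_nonneg _ _ hr, PySem.List.pySetD_of_nonneg _ _ hc,
    show r = ((r.toNat : Nat) : Int) by omega, PySem.List.pyGetD_natCast]
  simp only [Int.toNat_natCast]

theorem pvShape_gset {g : List (List Int)} {R C : Int} (r c v : Int)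
    (h : pvShape g R C) (hr : 0 ≤ r) (hr2 : r < R) (hc : 0 ≤ c) :
    pvShape (gset g r c v) R C := by
  obtain ⟨hl, hrow⟩ := h
  have hrn : r.toNat < g.length := by omega
  rw [gset_nonneg g r c v hr hc]
  refine ⟨by simpa using hl, ?_⟩
  intro row hmem
  rcases List.mem_or_eq_of_mem_set hmem with h1 | h1
  · exact hrow row h1
  · subst h1
    rw [List.length_set, List.getD_eq_getElem g [] hrn]
    exact hrow _ (List.getElem_mem hrn)

theorem gget_gset {g : List (List Int)} {R C : Int} (r c r' c' v : Int)
    (h : pvShape g R C) (hin : pvInR R C (r, c)) (hin' : pvInR R C (r', c')) :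
    gget (gset g r c v) r' c' = if r' = r ∧ c' = c then v else gget g r' c' := by
  obtain ⟨hl, hrow⟩ := h
  obtain ⟨a1, a2, a3, a4⟩ := hin
  obtain ⟨b1, b2, b3, b4⟩ := hin'
  dsimp only at a1 a2 a3 a4 b1 b2 b3 b4
  have hrn : r.toNat < g.length := by omega
  have hrn' : r'.toNat < g.length := by omega
  have hlen_r : ((g.getD r.toNat []).length : Int) = C := by
    rw [List.getD_eq_getElem g [] hrn]; exact hrow _ (List.getElem_mem hrn)
  have hcn : c.toNat < (g.getD r.toNat []).length := by omega
  have hcn' : c'.toNat < (g.getD r.toNat []).length := by omega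
  rw [gset_nonneg g r c v a1 a3, gget_nonneg _ r' c' b1 b3, gget_nonneg g r' c' b1 b3]
  rw [List.getD_eq_getElem?_getD (l := g.set r.toNat _), List.getElem?_set]
  by_cases hre : r' = r
  · have ht : r.toNat = r'.toNat := by omega
    rw [if_pos ht, if_pos (by omega)]
    simp only [Option.getD_some]
    rw [List.getD_eq_getElem?_getD (l := (g.getD r.toNat []).set c.toNat _), List.getElem?_set]
    by_cases hce : c' = c
    · have htc : c.toNat = c'.toNat := by omega
      rw [if_pos htc, if_pos (by omega)]
      rw [if_pos ⟨hre, hce⟩]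
      simp
    · rw [if_neg (by omega), if_neg (by exact fun hx => hce hx.2)]
      rw [hre, ← List.getD_eq_getElem?_getD]
  · rw [if_neg (by omega), if_neg (by exact fun hx => hre hx.1)]
    rw [← List.getD_eq_getElem?_getD]

theorem pv_grid_ext {g h : List (List Int)} {R C : Int}
    (hg : pvShape g R C) (hh : pvShape h R C)
    (he : ∀ r c : Int, 0 ≤ r → r < R → 0 ≤ c → c < C → gget g r c = gget h r c) :
    g = h := by
  obtain ⟨hgl, hgr⟩ := hg
  obtain ⟨hhl, hhr⟩ := hh
  apply List.ext_getElem (by omega)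
  intro i hi1 hi2
  have hil : (g[i].length : Int) = C := hgr _ (List.getElem_mem hi1)
  have hil' : (h[i].length : Int) = C := hhr _ (List.getElem_mem hi2)
  apply List.ext_getElem (by omega)
  intro j hj1 hj2
  have := he i j (by omega) (by omega) (by omega) (by omega)
  rw [gget_nonneg _ _ _ (by omega) (by omega),
    gget_nonneg _ _ _ (by omega) (by omega)] at this
  simp only [Int.toNat_natCast] at this
  rwa [List.getD_eq_getElem g [] hi1, List.getD_eq_getElem h [] hi2,
    List.getD_eq_getElem _ 0 hj1, List.getD_eq_getElem _ 0 hj2] at this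

-- ---- the write-shift state machine that A's walk performs along its path ----

def pvWS (cells : List (Int × Int)) (g : List (List Int)) (p : Int) :
    List (List Int) × Int :=
  cells.foldl (fun s rc => (gset s.1 rc.1 rc.2 s.2, gget s.1 rc.1 rc.2)) (g, p)

theorem pvWS_nil (g : List (List Int)) (p : Int) : pvWS [] g p = (g, p) := rfl

theorem pvWS_cons (rc : Int × Int) (cells : List (Int × Int)) (g : List (List Int)) (p : Int) :
    pvWS (rc :: cells) g p = pvWS cells (gset g rc.1 rc.2 p) (gget g rc.1 rc.2) := rfl

theorem pvWS_append (l₁ l₂ : List (Int × Int)) (g : List (List Int)) (p : Int) :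
    pvWS (l₁ ++ l₂) g p = pvWS l₂ (pvWS l₁ g p).1 (pvWS l₁ g p).2 := by
  unfold pvWS; rw [List.foldl_append]

theorem pvShape_pvWS {R C : Int} (cells : List (Int × Int)) (g : List (List Int)) (p : Int)
    (hin : ∀ q ∈ cells, pvInR R C q) (hg : pvShape g R C) :
    pvShape (pvWS cells g p).1 R C := by
  induction cells generalizing g p with
  | nil => simpa [pvWS_nil]
  | cons rc rest ih =>
    rw [pvWS_cons]
    have h0 := hin rc (by simp)
    exact ih _ _ (fun q hq => hin q (by simp [hq]))
      (pvShape_gset _ _ _ hg h0.1 h0.2.1 h0.2.2.1)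

-- B's bulk shift along a duplicate-free in-range path is exactly this machine
theorem shiftB_eq_pvWS {R C : Int} (cells : List (Int × Int)) (g : List (List Int)) (p : Int)
    (hnd : cells.Nodup) (hin : ∀ q ∈ cells, pvInR R C q) (hg : pvShape g R C) :
    ((cells.zip (p :: cells.dropLast.map (fun rc => gget g rc.1 rc.2))).foldl
        (fun g q => gset g q.1.1 q.1.2 q.2) g) = (pvWS cells g p).1 := by
  induction cells generalizing g p with
  | nil => rfl
  | cons rc rest ih =>
    have hrc := hin rc (by simp)
    have hg1 : pvShape (gset g rc.1 rc.2 p) R C := pvShape_gset _ _ _ hg hrc.1 hrc.2.1 hrc.2.2.1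
    cases rest with
    | nil => simp [pvWS_cons, pvWS_nil]
    | cons q2 rest2 =>
      rw [List.dropLast_cons₂]
      simp only [List.map_cons, List.zip_cons_cons, List.foldl_cons]
      rw [pvWS_cons]
      have hmap : (List.dropLast (q2 :: rest2)).map (fun rc => gget g rc.1 rc.2)
          = (List.dropLast (q2 :: rest2)).map
              (fun q => gget (gset g rc.1 rc.2 p) q.1 q.2) := by
        apply List.map_congr_left
        intro q hq
        have hqmem : q ∈ q2 :: rest2 := List.dropLast_sublist _ |>.subset hq
        have hqin := hin q (by simp [hqmem])
        have hne : q ≠ rc := by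
          intro hqe; subst hqe
          exact (List.nodup_cons.mp hnd).1 hqmem
        rw [gget_gset _ _ _ _ _ hg hrc hqin]
        rw [if_neg (by
          intro hcc
          exact hne (Prod.ext hcc.1 hcc.2))]
      rw [hmap]
      exact ih _ _ (List.nodup_cons.mp hnd).2 (fun q hq => hin q (by simp [hq])) hg1

theorem shiftB_eq {R C : Int} (cells : List (Int × Int)) (g : List (List Int))
    (hnd : cells.Nodup) (hin : ∀ q ∈ cells, pvInR R C q) (hg : pvShape g R C) :
    shiftB g cells = (pvWS cells g 0).1 := by
  unfold shiftB
  exact shiftB_eq_pvWS cells g 0 hnd hin hg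

theorem pvShape_shiftB {R C : Int} (cells : List (Int × Int)) (g : List (List Int))
    (hnd : cells.Nodup) (hin : ∀ q ∈ cells, pvInR R C q) (hg : pvShape g R C) :
    pvShape (shiftB g cells) R C := by
  rw [shiftB_eq cells g hnd hin hg]
  exact pvShape_pvWS cells g 0 hin hg

-- ---- characterising A's walk, phase by phase ----

def pathSeg (cr cc dr dc : Int) : Nat → List (Int × Int)
  | 0 => []
  | k + 1 => (cr, cc) :: pathSeg (cr + dr) (cc + dc) dr dc k

theorem walk_straight (R C brink turn : Int) (d drv dcv : Int)
    (hd : PySem.List.pyGetD pvDr d 0 = drv) (hc : PySem.List.pyGetD pvDc d 0 = dcv) :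
    ∀ (k : Nat) (fuel : Nat) (g : List (List Int)) (cr cc past : Int),
    (∀ i : Int, 0 ≤ i → i < k →
      (cr + (i+1)*drv ≠ R ∧ cc + (i+1)*dcv ≠ C ∧ cr + (i+1)*drv ≠ -1 ∧ cc + (i+1)*dcv ≠ -1)) →
    (∀ i : Int, 0 ≤ i → i < k → ¬(cr + i*drv = brink ∧ cc + i*dcv = 0)) →
    pvWalk R C brink turn (k + fuel) g cr cc d past =
      pvWalk R C brink turn fuel (pvWS (pathSeg cr cc drv dcv k) g past).1
        (cr + k*drv) (cc + k*dcv) d (pvWS (pathSeg cr cc drv dcv k) g past).2 := by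
  intro k
  induction k with
  | zero => intro fuel g cr cc past _ _; simp [pathSeg, pvWS_nil]
  | succ k ih =>
    intro fuel g cr cc past hnb hbk
    rw [show k + 1 + fuel = (k + fuel) + 1 by omega]
    rw [pvWalk, hd, hc]
    rw [if_neg (by
      have := hnb 0 le_rfl (by omega)
      push Not
      refine ⟨by simpa using this.1, by simpa using this.2.1,
        by simpa using this.2.2.1, by simpa using this.2.2.2⟩)]
    rw [if_neg (by
      have := hbk 0 le_rfl (by omega)
      simpa using this)]
    rw [ih fuel (gset g cr cc past) (cr + drv) (cc + dcv) (gget g cr cc)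
      (by intro i h0 hi
          have := hnb (i+1) (by omega) (by push_cast; omega)
          refine ⟨?_, ?_, ?_, ?_⟩
          · have h := this.1; intro hx; apply h; linarith [hx]
          · have h := this.2.1; intro hx; apply h; linarith [hx]
          · have h := this.2.2.1; intro hx; apply h; linarith [hx]
          · have h := this.2.2.2; intro hx; apply h; linarith [hx])
      (by intro i h0 hi
          have := hbk (i+1) (by omega) (by push_cast; omega)
          intro hcontra
          apply this
          constructor
          · rw [← hcontra.1]; ring
          · rw [← hcontra.2]; ring)]
    rw [show pathSeg cr cc drv dcv (k+1) = (cr, cc) :: pathSeg (cr + drv) (cc + dcv) drv dcv k from rfl]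
    rw [pvWS_cons]
    push_cast
    ring_nf

theorem walk_turn (R C brink turn d : Int) (fuel : Nat) (g : List (List Int))
    (cr cc past : Int)
    (hb : cr + PySem.List.pyGetD pvDr d 0 = R ∨ cc + PySem.List.pyGetD pvDc d 0 = C ∨
          cr + PySem.List.pyGetD pvDr d 0 = -1 ∨ cc + PySem.List.pyGetD pvDc d 0 = -1) :
    pvWalk R C brink turn (fuel + 1) g cr cc d past =
      pvWalk R C brink turn fuel g cr cc (PySem.Int.mod (d + turn) 4) past := by
  rw [pvWalk]
  rw [if_pos hb]

theorem walk_break (R C brink turn d : Int) (fuel : Nat) (g : List (List Int)) (past : Int)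
    (hnb : brink + PySem.List.pyGetD pvDr d 0 ≠ R ∧ 0 + PySem.List.pyGetD pvDc d 0 ≠ C ∧
           brink + PySem.List.pyGetD pvDr d 0 ≠ -1 ∧ 0 + PySem.List.pyGetD pvDc d 0 ≠ -1) :
    pvWalk R C brink turn (fuel + 1) g brink 0 d past = g := by
  rw [pvWalk]
  rw [if_neg (by push_neg; exact ⟨hnb.1, hnb.2.1, hnb.2.2.1, hnb.2.2.2⟩)]
  rw [if_pos ⟨rfl, rfl⟩]

-- ---- converting pathSeg to B's pyRange segments ----

theorem pathSeg_right (cr : Int) : ∀ (k : Nat) (cc : Int),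
    pathSeg cr cc 0 1 k = (PySem.List.pyRange cc (cc + k)).map (fun c => (cr, c)) := by
  intro k
  induction k with
  | zero => intro cc; simp [pathSeg, PySem.List.pyRange_one_eq_nil]
  | succ k ih =>
    intro cc
    rw [show pathSeg cr cc 0 1 (k+1) = (cr, cc) :: pathSeg (cr + 0) (cc + 1) 0 1 k from rfl]
    rw [PySem.List.pyRange_one_cons (by push_cast; omega)]
    simp only [List.map_cons]
    rw [show cr + 0 = cr by ring, ih (cc + 1)]
    congr 2
    push_cast
    ring

theorem pathSeg_left (cr : Int) : ∀ (k : Nat) (cc : Int),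
    pathSeg cr cc 0 (-1) k = (PySem.List.pyRange cc (cc - k) (-1)).map (fun c => (cr, c)) := by
  intro k
  induction k with
  | zero => intro cc; simp [pathSeg, PySem.List.pyRange_neg_one_eq_nil]
  | succ k ih =>
    intro cc
    rw [show pathSeg cr cc 0 (-1) (k+1) = (cr, cc) :: pathSeg (cr + 0) (cc + -1) 0 (-1) k from rfl]
    rw [PySem.List.pyRange_neg_one_cons (by push_cast; omega)]
    simp only [List.map_cons]
    rw [show cr + 0 = cr by ring, ih (cc + -1)]
    congr 2
    push_cast
    ring

theorem pathSeg_down (cc : Int) : ∀ (k : Nat) (cr : Int),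
    pathSeg cr cc 1 0 k = (PySem.List.pyRange cr (cr + k)).map (fun r => (r, cc)) := by
  intro k
  induction k with
  | zero => intro cr; simp [pathSeg, PySem.List.pyRange_one_eq_nil]
  | succ k ih =>
    intro cr
    rw [show pathSeg cr cc 1 0 (k+1) = (cr, cc) :: pathSeg (cr + 1) (cc + 0) 1 0 k from rfl]
    rw [PySem.List.pyRange_one_cons (by push_cast; omega)]
    simp only [List.map_cons]
    rw [show cc + 0 = cc by ring, ih (cr + 1)]
    congr 2
    push_cast
    ring

theorem pathSeg_up (cc : Int) : ∀ (k : Nat) (cr : Int),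
    pathSeg cr cc (-1) 0 k = (PySem.List.pyRange cr (cr - k) (-1)).map (fun r => (r, cc)) := by
  intro k
  induction k with
  | zero => intro cr; simp [pathSeg, PySem.List.pyRange_neg_one_eq_nil]
  | succ k ih =>
    intro cr
    rw [show pathSeg cr cc (-1) 0 (k+1) = (cr, cc) :: pathSeg (cr + -1) (cc + 0) (-1) 0 k from rfl]
    rw [PySem.List.pyRange_neg_one_cons (by push_cast; omega)]
    simp only [List.map_cons]
    rw [show cc + 0 = cc by ring, ih (cr + -1)]
    congr 2
    push_cast
    ring

-- ---- ring path facts ----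

theorem pyRange_neg_one_append_last (a b : Int) (h : b < a) :
    PySem.List.pyRange a b (-1) = PySem.List.pyRange a (b + 1) (-1) ++ [b + 1] := by
  rw [PySem.List.pyRange_neg_one_eq_reverse, PySem.List.pyRange_neg_one_eq_reverse a (b + 1)]
  rw [PySem.List.pyRange_one_cons (by omega)]
  rw [List.reverse_cons]

theorem nodup_map_pair_snd (a b x : Int) :
    ((PySem.List.pyRange a b).map (fun c => (x, c))).Nodup :=
  List.Nodup.map (by intro u v huv; simpa using huv) (PySem.List.nodup_pyRange_one a b)

theorem nodup_map_pair_fst (a b x : Int) :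
    ((PySem.List.pyRange a b).map (fun r => (r, x))).Nodup :=
  List.Nodup.map (by intro u v huv; simpa using huv) (PySem.List.nodup_pyRange_one a b)

theorem nodup_map_pair_snd' (a b x : Int) :
    ((PySem.List.pyRange a b (-1)).map (fun c => (x, c))).Nodup := by
  rw [PySem.List.pyRange_neg_one_eq_reverse]
  exact List.Nodup.map (by intro u v huv; simpa using huv)
    (List.nodup_reverse.mpr (PySem.List.nodup_pyRange_one _ _))

theorem nodup_map_pair_fst' (a b x : Int) :
    ((PySem.List.pyRange a b (-1)).map (fun r => (r, x))).Nodup := by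
  rw [PySem.List.pyRange_neg_one_eq_reverse]
  exact List.Nodup.map (by intro u v huv; simpa using huv)
    (List.nodup_reverse.mpr (PySem.List.nodup_pyRange_one _ _))

theorem pvInR_mk {R C a b : Int} (h1 : 0 ≤ a) (h2 : a < R) (h3 : 0 ≤ b) (h4 : b < C) :
    pvInR R C (a, b) := ⟨h1, h2, h3, h4⟩

theorem pv_disj_maps {l1 l2 : List Int} (f g : Int → Int × Int)
    (h : ∀ u ∈ l1, ∀ v ∈ l2, f u ≠ g v) : (l1.map f).Disjoint (l2.map g) := by
  intro q hq hq'
  simp only [List.mem_map] at hq hq'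
  obtain ⟨u, hu, rfl⟩ := hq
  obtain ⟨v, hv, he⟩ := hq'
  exact h u hu v hv he.symm

theorem mem_pyRange_neg' {a b x : Int} (h : x ∈ PySem.List.pyRange a b (-1)) :
    b < x ∧ x ≤ a := PySem.List.mem_pyRange_neg_one.mp h

theorem mem_pyRange' {a b x : Int} (h : x ∈ PySem.List.pyRange a b) :
    a ≤ x ∧ x < b := PySem.List.mem_pyRange_one.mp h

theorem ringUp_inR {R C r0 : Int} (hr0 : 1 ≤ r0) (hr0R : r0 < R) (hC : 2 ≤ C) :
    ∀ q ∈ ringUp R C r0, pvInR R C q := by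
  intro q hq
  unfold ringUp at hq
  simp only [List.mem_append, List.mem_map, PySem.List.mem_pyRange_one,
    PySem.List.mem_pyRange_neg_one] at hq
  rcases hq with ((⟨c, hc, rfl⟩ | ⟨r, hr, rfl⟩) | ⟨c, hc, rfl⟩) | ⟨r, hr, rfl⟩ <;>
    exact pvInR_mk (by omega) (by omega) (by omega) (by omega)

theorem ringDown_inR {R C r1 : Int} (hr1 : 0 ≤ r1) (hr1R : r1 ≤ R - 2) (hC : 2 ≤ C) :
    ∀ q ∈ ringDown R C r1, pvInR R C q := by
  intro q hq
  unfold ringDown at hq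
  simp only [List.mem_append, List.mem_map, PySem.List.mem_pyRange_one,
    PySem.List.mem_pyRange_neg_one] at hq
  rcases hq with ((⟨c, hc, rfl⟩ | ⟨r, hr, rfl⟩) | ⟨c, hc, rfl⟩) | ⟨r, hr, rfl⟩ <;>
    exact pvInR_mk (by omega) (by omega) (by omega) (by omega)

theorem ringUp_nodup {R C r0 : Int} (hr0 : 1 ≤ r0) (hC : 2 ≤ C) :
    (ringUp R C r0).Nodup := by
  unfold ringUp
  have d12 := pv_disj_maps (l1 := PySem.List.pyRange 1 C)
    (l2 := PySem.List.pyRange (r0 - 1) (-1) (-1)) (fun c => (r0, c)) (fun r => (r, C - 1))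
    (by intro u hu v hv
        have h1 := mem_pyRange' hu; have h2 := mem_pyRange_neg' hv
        intro hx; rw [Prod.mk.injEq] at hx; omega)
  have d13 := pv_disj_maps (l1 := PySem.List.pyRange 1 C)
    (l2 := PySem.List.pyRange (C - 2) (-1) (-1)) (fun c => (r0, c)) (fun c => ((0 : Int), c))
    (by intro u hu v hv
        have h1 := mem_pyRange' hu; have h2 := mem_pyRange_neg' hv
        intro hx; rw [Prod.mk.injEq] at hx; omega)
  have d14 := pv_disj_maps (l1 := PySem.List.pyRange 1 C)
    (l2 := PySem.List.pyRange 1 r0) (fun c => (r0, c)) (fun r => (r, (0 : Int)))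
    (by intro u hu v hv
        have h1 := mem_pyRange' hu; have h2 := mem_pyRange' hv
        intro hx; rw [Prod.mk.injEq] at hx; omega)
  have d23 := pv_disj_maps (l1 := PySem.List.pyRange (r0 - 1) (-1) (-1))
    (l2 := PySem.List.pyRange (C - 2) (-1) (-1)) (fun r => (r, C - 1)) (fun c => ((0 : Int), c))
    (by intro u hu v hv
        have h1 := mem_pyRange_neg' hu; have h2 := mem_pyRange_neg' hv
        intro hx; rw [Prod.mk.injEq] at hx; omega)
  have d24 := pv_disj_maps (l1 := PySem.List.pyRange (r0 - 1) (-1) (-1))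
    (l2 := PySem.List.pyRange 1 r0) (fun r => (r, C - 1)) (fun r => (r, (0 : Int)))
    (by intro u hu v hv
        have h1 := mem_pyRange_neg' hu; have h2 := mem_pyRange' hv
        intro hx; rw [Prod.mk.injEq] at hx; omega)
  have d34 := pv_disj_maps (l1 := PySem.List.pyRange (C - 2) (-1) (-1))
    (l2 := PySem.List.pyRange 1 r0) (fun c => ((0 : Int), c)) (fun r => (r, (0 : Int)))
    (by intro u hu v hv
        have h1 := mem_pyRange_neg' hu; have h2 := mem_pyRange' hv
        intro hx; rw [Prod.mk.injEq] at hx; omega)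
  rw [List.append_assoc, List.append_assoc]
  refine List.Nodup.append (nodup_map_pair_snd _ _ _) ?_ ?_
  · refine List.Nodup.append (nodup_map_pair_fst' _ _ _) ?_ ?_
    · exact List.Nodup.append (nodup_map_pair_snd' _ _ _) (nodup_map_pair_fst _ _ _) d34
    · rw [List.disjoint_append_right]; exact ⟨d23, d24⟩
  · rw [List.disjoint_append_right, List.disjoint_append_right]
    exact ⟨d12, d13, d14⟩

theorem ringDown_nodup {R C r1 : Int} (hr1 : 0 ≤ r1) (hr1R : r1 ≤ R - 2) (hC : 2 ≤ C) :
    (ringDown R C r1).Nodup := by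
  unfold ringDown
  have d12 := pv_disj_maps (l1 := PySem.List.pyRange 1 C)
    (l2 := PySem.List.pyRange (r1 + 1) R) (fun c => (r1, c)) (fun r => (r, C - 1))
    (by intro u hu v hv
        have h1 := mem_pyRange' hu; have h2 := mem_pyRange' hv
        intro hx; rw [Prod.mk.injEq] at hx; omega)
  have d13 := pv_disj_maps (l1 := PySem.List.pyRange 1 C)
    (l2 := PySem.List.pyRange (C - 2) (-1) (-1)) (fun c => (r1, c)) (fun c => (R - 1, c))
    (by intro u hu v hv
        have h1 := mem_pyRange' hu; have h2 := mem_pyRange_neg' hv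
        intro hx; rw [Prod.mk.injEq] at hx; omega)
  have d14 := pv_disj_maps (l1 := PySem.List.pyRange 1 C)
    (l2 := PySem.List.pyRange (R - 2) r1 (-1)) (fun c => (r1, c)) (fun r => (r, (0 : Int)))
    (by intro u hu v hv
        have h1 := mem_pyRange' hu; have h2 := mem_pyRange_neg' hv
        intro hx; rw [Prod.mk.injEq] at hx; omega)
  have d23 := pv_disj_maps (l1 := PySem.List.pyRange (r1 + 1) R)
    (l2 := PySem.List.pyRange (C - 2) (-1) (-1)) (fun r => (r, C - 1)) (fun c => (R - 1, c))
    (by intro u hu v hv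
        have h1 := mem_pyRange' hu; have h2 := mem_pyRange_neg' hv
        intro hx; rw [Prod.mk.injEq] at hx; omega)
  have d24 := pv_disj_maps (l1 := PySem.List.pyRange (r1 + 1) R)
    (l2 := PySem.List.pyRange (R - 2) r1 (-1)) (fun r => (r, C - 1)) (fun r => (r, (0 : Int)))
    (by intro u hu v hv
        have h1 := mem_pyRange' hu; have h2 := mem_pyRange_neg' hv
        intro hx; rw [Prod.mk.injEq] at hx; omega)
  have d34 := pv_disj_maps (l1 := PySem.List.pyRange (C - 2) (-1) (-1))
    (l2 := PySem.List.pyRange (R - 2) r1 (-1)) (fun c => (R - 1, c)) (fun r => (r, (0 : Int)))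
    (by intro u hu v hv
        have h1 := mem_pyRange_neg' hu; have h2 := mem_pyRange_neg' hv
        intro hx; rw [Prod.mk.injEq] at hx; omega)
  rw [List.append_assoc, List.append_assoc]
  refine List.Nodup.append (nodup_map_pair_snd _ _ _) ?_ ?_
  · refine List.Nodup.append (nodup_map_pair_fst _ _ _) ?_ ?_
    · exact List.Nodup.append (nodup_map_pair_snd' _ _ _) (nodup_map_pair_fst' _ _ _) d34
    · rw [List.disjoint_append_right]; exact ⟨d23, d24⟩
  · rw [List.disjoint_append_right, List.disjoint_append_right]
    exact ⟨d12, d13, d14⟩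

theorem ringUp_decomp {R C r0 : Int} (hr0 : 1 ≤ r0) (hr0R : r0 < R) (hC : 2 ≤ C) :
    ringUp R C r0 =
      pathSeg r0 1 0 1 (C - 2).toNat ++ (pathSeg r0 (C - 1) (-1) 0 r0.toNat ++
        (pathSeg 0 (C - 1) 0 (-1) (C - 1).toNat ++ (pathSeg 0 0 1 0 1 ++
          pathSeg 1 0 1 0 (r0 - 1).toNat))) := by
  rw [pathSeg_right, pathSeg_up, pathSeg_left, pathSeg_down, pathSeg_down]
  rw [show (1 : Int) + ((C - 2).toNat : Int) = C - 1 by omega,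
    show r0 - (r0.toNat : Int) = 0 by omega,
    show C - 1 - ((C - 1).toNat : Int) = 0 by omega,
    show (0 : Int) + ((1 : Nat) : Int) = 1 by omega,
    show (1 : Int) + (((r0 - 1).toNat : Nat) : Int) = r0 by omega]
  unfold ringUp
  have e1 : PySem.List.pyRange 1 C = PySem.List.pyRange 1 (C - 1) ++ [C - 1] := by
    have := PySem.List.pyRange_one_succ_right (a := 1) (b := C - 1) (by omega)
    rw [show C - 1 + 1 = C by ring] at this
    exact this
  have e2 : PySem.List.pyRange (r0 - 1) (-1) (-1)
      = PySem.List.pyRange (r0 - 1) 0 (-1) ++ [0] := by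
    have := pyRange_neg_one_append_last (r0 - 1) (-1) (by omega)
    simpa using this
  have e3 : PySem.List.pyRange (C - 2) (-1) (-1)
      = PySem.List.pyRange (C - 2) 0 (-1) ++ [0] := by
    have := pyRange_neg_one_append_last (C - 2) (-1) (by omega)
    simpa using this
  have e4 : PySem.List.pyRange r0 0 (-1) = r0 :: PySem.List.pyRange (r0 - 1) 0 (-1) :=
    PySem.List.pyRange_neg_one_cons (by omega)
  have e5 : PySem.List.pyRange (C - 1) 0 (-1)
      = (C - 1) :: PySem.List.pyRange (C - 2) 0 (-1) := by
    have := PySem.List.pyRange_neg_one_cons (a := C - 1) (b := 0) (by omega)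
    rw [show C - 1 - 1 = C - 2 by ring] at this
    exact this
  rw [e1, e2, e3, e4, e5]
  simp only [List.map_append, List.map_cons, List.map_nil, List.append_assoc,
    PySem.List.pyRange_one_singleton, List.cons_append, List.nil_append]
  rfl

theorem ringDown_decomp {R C r1 : Int} (hr1 : 0 ≤ r1) (hr1R : r1 ≤ R - 2) (hC : 2 ≤ C) :
    ringDown R C r1 =
      pathSeg r1 1 0 1 (C - 2).toNat ++ (pathSeg r1 (C - 1) 1 0 (R - 1 - r1).toNat ++
        (pathSeg (R - 1) (C - 1) 0 (-1) (C - 1).toNat ++ (pathSeg (R - 1) 0 (-1) 0 1 ++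
          pathSeg (R - 2) 0 (-1) 0 (R - 2 - r1).toNat))) := by
  rw [pathSeg_right, pathSeg_down, pathSeg_left, pathSeg_up, pathSeg_up]
  rw [show (1 : Int) + ((C - 2).toNat : Int) = C - 1 by omega,
    show r1 + ((R - 1 - r1).toNat : Int) = R - 1 by omega,
    show C - 1 - ((C - 1).toNat : Int) = 0 by omega,
    show R - 1 - (((1 : Nat) : Nat) : Int) = R - 2 by omega,
    show R - 2 - (((R - 2 - r1).toNat : Nat) : Int) = r1 by omega]
  unfold ringDown
  have e1 : PySem.List.pyRange 1 C = PySem.List.pyRange 1 (C - 1) ++ [C - 1] := by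
    have := PySem.List.pyRange_one_succ_right (a := 1) (b := C - 1) (by omega)
    rw [show C - 1 + 1 = C by ring] at this
    exact this
  have e2 : PySem.List.pyRange (r1 + 1) R
      = PySem.List.pyRange (r1 + 1) (R - 1) ++ [R - 1] := by
    have := PySem.List.pyRange_one_succ_right (a := r1 + 1) (b := R - 1) (by omega)
    rw [show R - 1 + 1 = R by ring] at this
    exact this
  have e3 : PySem.List.pyRange (C - 2) (-1) (-1)
      = PySem.List.pyRange (C - 2) 0 (-1) ++ [0] := by
    have := pyRange_neg_one_append_last (C - 2) (-1) (by omega)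
    simpa using this
  have e4 : PySem.List.pyRange r1 (R - 1) = r1 :: PySem.List.pyRange (r1 + 1) (R - 1) :=
    PySem.List.pyRange_one_cons (by omega)
  have e5 : PySem.List.pyRange (C - 1) 0 (-1)
      = (C - 1) :: PySem.List.pyRange (C - 2) 0 (-1) := by
    have := PySem.List.pyRange_neg_one_cons (a := C - 1) (b := 0) (by omega)
    rw [show C - 1 - 1 = C - 2 by ring] at this
    exact this
  have e6 : PySem.List.pyRange (R - 1) (R - 2) (-1) = [R - 1] := by
    rw [PySem.List.pyRange_neg_one_cons (by omega),
      PySem.List.pyRange_neg_one_eq_nil (by omega)]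
  rw [e1, e2, e3, e4, e5, e6]
  simp only [List.map_append, List.map_cons, List.map_nil, List.append_assoc,
    List.cons_append, List.nil_append]

-- ---- assembling the two walks ----

theorem purify_up {R C r0 : Int} (g : List (List Int)) (hr0 : 1 ≤ r0) (hr0R : r0 < R)
    (hC : 2 ≤ C) :
    pvWalk R C r0 (-1) (pvFuel R C) g r0 1 1 0 = (pvWS (ringUp R C r0) g 0).1 := by
  have hR : 2 ≤ R := by omega
  obtain ⟨s, hf⟩ : ∃ s, pvFuel R C =
      (C - 2).toNat + (((r0).toNat + (((C - 1).toNat +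
        ((1 + ((r0 - 1).toNat + (s + 2))) + 1)) + 1)) + 1) :=
    ⟨pvFuel R C - ((C - 2).toNat + (((r0).toNat + (((C - 1).toNat +
        ((1 + ((r0 - 1).toNat + 2)) + 1)) + 1)) + 1)), by unfold pvFuel; omega⟩
  rw [hf]
  -- rightward along row r0
  rw [walk_straight R C r0 (-1) 1 0 1 (by decide) (by decide) (C - 2).toNat _ _ r0 1 _
    (by intro i h0 hi; exact ⟨by omega, by omega, by omega, by omega⟩)
    (by intro i h0 hi hx; omega)]
  rw [show r0 + ((C - 2).toNat : Int) * 0 = r0 by ring,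
    show (1 : Int) + ((C - 2).toNat : Int) * 1 = C - 1 by omega]
  -- turn up at (r0, C-1)
  rw [walk_turn R C r0 (-1) 1 _ _ r0 (C - 1) _
    (Or.inr (Or.inl (by rw [show PySem.List.pyGetD pvDc 1 0 = 1 from by decide]; ring)))]
  rw [show PySem.Int.mod (1 + -1) 4 = 0 from by decide]
  -- upward along column C-1
  rw [walk_straight R C r0 (-1) 0 (-1) 0 (by decide) (by decide) r0.toNat _ _ r0 (C - 1) _
    (by intro i h0 hi; exact ⟨by omega, by omega, by omega, by omega⟩)
    (by intro i h0 hi hx; omega)]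
  rw [show r0 + (r0.toNat : Int) * (-1) = 0 by omega,
    show C - 1 + (r0.toNat : Int) * 0 = C - 1 by ring]
  -- turn left at (0, C-1)
  rw [walk_turn R C r0 (-1) 0 _ _ 0 (C - 1) _
    (Or.inr (Or.inr (Or.inl (by rw [show PySem.List.pyGetD pvDr 0 0 = -1 from by decide]; ring))))]
  rw [show PySem.Int.mod (0 + -1) 4 = 3 from by decide]
  -- leftward along row 0
  rw [walk_straight R C r0 (-1) 3 0 (-1) (by decide) (by decide) (C - 1).toNat _ _ 0 (C - 1) _
    (by intro i h0 hi; exact ⟨by omega, by omega, by omega, by omega⟩)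
    (by intro i h0 hi hx; omega)]
  rw [show (0 : Int) + ((C - 1).toNat : Int) * 0 = 0 by ring,
    show C - 1 + ((C - 1).toNat : Int) * (-1) = 0 by omega]
  -- turn down at (0, 0)
  rw [walk_turn R C r0 (-1) 3 _ _ 0 0 _
    (Or.inr (Or.inr (Or.inr (by rw [show PySem.List.pyGetD pvDc 3 0 = -1 from by decide]; ring))))]
  rw [show PySem.Int.mod (3 + -1) 4 = 2 from by decide]
  -- one step down from (0, 0)
  rw [walk_straight R C r0 (-1) 2 1 0 (by decide) (by decide) 1 _ _ 0 0 _
    (by intro i h0 hi; exact ⟨by omega, by omega, by omega, by omega⟩)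
    (by intro i h0 hi hx; omega)]
  rw [show (0 : Int) + ((1 : Nat) : Int) * 1 = 1 by norm_num,
    show (0 : Int) + ((1 : Nat) : Int) * 0 = 0 by norm_num]
  -- downward along column 0
  rw [walk_straight R C r0 (-1) 2 1 0 (by decide) (by decide) (r0 - 1).toNat _ _ 1 0 _
    (by intro i h0 hi; exact ⟨by omega, by omega, by omega, by omega⟩)
    (by intro i h0 hi hx; omega)]
  rw [show (1 : Int) + ((r0 - 1).toNat : Int) * 1 = r0 by omega,
    show (0 : Int) + ((r0 - 1).toNat : Int) * 0 = 0 by ring]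
  -- break at (r0, 0)
  rw [ringUp_decomp hr0 hr0R hC, pvWS_append, pvWS_append, pvWS_append, pvWS_append]
  by_cases hRe : r0 + 1 = R
  · rw [show s + 2 = (s + 1) + 1 by omega]
    rw [walk_turn R C r0 (-1) 2 _ _ r0 0 _
      (Or.inl (by rw [show PySem.List.pyGetD pvDr 2 0 = 1 from by decide]; omega))]
    rw [show PySem.Int.mod (2 + -1) 4 = 1 from by decide]
    rw [walk_break R C r0 (-1) 1 s _ _
      ⟨by rw [show PySem.List.pyGetD pvDr 1 0 = 0 from by decide]; omega,
       by rw [show PySem.List.pyGetD pvDc 1 0 = 1 from by decide]; omega,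
       by rw [show PySem.List.pyGetD pvDr 1 0 = 0 from by decide]; omega,
       by rw [show PySem.List.pyGetD pvDc 1 0 = 1 from by decide]; omega⟩]
  · rw [show s + 2 = (s + 1) + 1 by omega]
    rw [walk_break R C r0 (-1) 2 (s + 1) _ _
      ⟨by rw [show PySem.List.pyGetD pvDr 2 0 = 1 from by decide]; omega,
       by rw [show PySem.List.pyGetD pvDc 2 0 = 0 from by decide]; omega,
       by rw [show PySem.List.pyGetD pvDr 2 0 = 1 from by decide]; omega,
       by rw [show PySem.List.pyGetD pvDc 2 0 = 0 from by decide]; omega⟩]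

theorem purify_down {R C r1 : Int} (g : List (List Int)) (hr1 : 0 ≤ r1) (hr1R : r1 ≤ R - 2)
    (hC : 2 ≤ C) :
    pvWalk R C r1 1 (pvFuel R C) g r1 1 1 0 = (pvWS (ringDown R C r1) g 0).1 := by
  have hR : 2 ≤ R := by omega
  obtain ⟨s, hf⟩ : ∃ s, pvFuel R C =
      (C - 2).toNat + (((R - 1 - r1).toNat + (((C - 1).toNat +
        ((1 + ((R - 2 - r1).toNat + (s + 2))) + 1)) + 1)) + 1) :=
    ⟨pvFuel R C - ((C - 2).toNat + (((R - 1 - r1).toNat + (((C - 1).toNat +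
        ((1 + ((R - 2 - r1).toNat + 2)) + 1)) + 1)) + 1)), by unfold pvFuel; omega⟩
  rw [hf]
  -- rightward along row r1
  rw [walk_straight R C r1 1 1 0 1 (by decide) (by decide) (C - 2).toNat _ _ r1 1 _
    (by intro i h0 hi; exact ⟨by omega, by omega, by omega, by omega⟩)
    (by intro i h0 hi hx; omega)]
  rw [show r1 + ((C - 2).toNat : Int) * 0 = r1 by ring,
    show (1 : Int) + ((C - 2).toNat : Int) * 1 = C - 1 by omega]
  -- turn down at (r1, C-1)
  rw [walk_turn R C r1 1 1 _ _ r1 (C - 1) _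
    (Or.inr (Or.inl (by rw [show PySem.List.pyGetD pvDc 1 0 = 1 from by decide]; ring)))]
  rw [show PySem.Int.mod (1 + 1) 4 = 2 from by decide]
  -- downward along column C-1
  rw [walk_straight R C r1 1 2 1 0 (by decide) (by decide) (R - 1 - r1).toNat _ _ r1 (C - 1) _
    (by intro i h0 hi; exact ⟨by omega, by omega, by omega, by omega⟩)
    (by intro i h0 hi hx; omega)]
  rw [show r1 + ((R - 1 - r1).toNat : Int) * 1 = R - 1 by omega,
    show C - 1 + ((R - 1 - r1).toNat : Int) * 0 = C - 1 by ring]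
  -- turn left at (R-1, C-1)
  rw [walk_turn R C r1 1 2 _ _ (R - 1) (C - 1) _
    (Or.inl (by rw [show PySem.List.pyGetD pvDr 2 0 = 1 from by decide]; ring))]
  rw [show PySem.Int.mod (2 + 1) 4 = 3 from by decide]
  -- leftward along row R-1
  rw [walk_straight R C r1 1 3 0 (-1) (by decide) (by decide) (C - 1).toNat _ _ (R - 1) (C - 1) _
    (by intro i h0 hi; exact ⟨by omega, by omega, by omega, by omega⟩)
    (by intro i h0 hi hx; omega)]
  rw [show R - 1 + ((C - 1).toNat : Int) * 0 = R - 1 by ring,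
    show C - 1 + ((C - 1).toNat : Int) * (-1) = 0 by omega]
  -- turn up at (R-1, 0)
  rw [walk_turn R C r1 1 3 _ _ (R - 1) 0 _
    (Or.inr (Or.inr (Or.inr (by rw [show PySem.List.pyGetD pvDc 3 0 = -1 from by decide]; ring))))]
  rw [show PySem.Int.mod (3 + 1) 4 = 0 from by decide]
  -- one step up from (R-1, 0)
  rw [walk_straight R C r1 1 0 (-1) 0 (by decide) (by decide) 1 _ _ (R - 1) 0 _
    (by intro i h0 hi; exact ⟨by omega, by omega, by omega, by omega⟩)
    (by intro i h0 hi hx; omega)]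
  rw [show R - 1 + ((1 : Nat) : Int) * (-1) = R - 2 by norm_num; ring,
    show (0 : Int) + ((1 : Nat) : Int) * 0 = 0 by norm_num]
  -- upward along column 0
  rw [walk_straight R C r1 1 0 (-1) 0 (by decide) (by decide) (R - 2 - r1).toNat _ _ (R - 2) 0 _
    (by intro i h0 hi; exact ⟨by omega, by omega, by omega, by omega⟩)
    (by intro i h0 hi hx; omega)]
  rw [show R - 2 + ((R - 2 - r1).toNat : Int) * (-1) = r1 by omega,
    show (0 : Int) + ((R - 2 - r1).toNat : Int) * 0 = 0 by ring]
  -- break at (r1, 0)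
  rw [ringDown_decomp hr1 hr1R hC, pvWS_append, pvWS_append, pvWS_append, pvWS_append]
  by_cases hRe : r1 = 0
  · rw [show s + 2 = (s + 1) + 1 by omega]
    rw [walk_turn R C r1 1 0 _ _ r1 0 _
      (Or.inr (Or.inr (Or.inl (by rw [show PySem.List.pyGetD pvDr 0 0 = -1 from by decide]; omega))))]
    rw [show PySem.Int.mod (0 + 1) 4 = 1 from by decide]
    rw [walk_break R C r1 1 1 s _ _
      ⟨by rw [show PySem.List.pyGetD pvDr 1 0 = 0 from by decide]; omega,
       by rw [show PySem.List.pyGetD pvDc 1 0 = 1 from by decide]; omega,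
       by rw [show PySem.List.pyGetD pvDr 1 0 = 0 from by decide]; omega,
       by rw [show PySem.List.pyGetD pvDc 1 0 = 1 from by decide]; omega⟩]
  · rw [show s + 2 = (s + 1) + 1 by omega]
    rw [walk_break R C r1 1 0 (s + 1) _ _
      ⟨by rw [show PySem.List.pyGetD pvDr 0 0 = -1 from by decide]; omega,
       by rw [show PySem.List.pyGetD pvDc 0 0 = 0 from by decide]; omega,
       by rw [show PySem.List.pyGetD pvDr 0 0 = -1 from by decide]; omega,
       by rw [show PySem.List.pyGetD pvDc 0 0 = 0 from by decide]; omega⟩]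

-- ---- diffusion: A's scatter + copy-back loop equals B's fresh-grid scatter ----

theorem pvShape_base (R C : Int) (hR : 0 ≤ R) (hC : 0 ≤ C) :
    pvShape ((PySem.List.pyRange 0 R).map (fun _ => List.replicate C.toNat (0 : Int))) R C := by
  constructor
  · rw [List.length_map, PySem.List.length_pyRange_one]; omega
  · intro row h
    rw [List.mem_map] at h
    obtain ⟨_, _, rfl⟩ := h
    rw [List.length_replicate]; omega

theorem any_tupleEqList_false (p : Int × Int) (l : List (List Int)) :
    l.any (pyTupleEqList p) = false := by
  rw [List.any_eq_false]
  intro x _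
  simp [pyTupleEqList]

theorem copy_row {R C : Int} (graph : List (List Int)) (r : Int) (hr : 0 ≤ r) (hrR : r < R) :
    ∀ (m : Nat) (t : List (List Int)), (m : Int) ≤ C → pvShape t R C →
      pvShape ((PySem.List.pyRange 0 (m : Int)).foldl
        (fun t c => gset t r c (gget graph r c)) t) R C ∧
      ∀ r' c' : Int, 0 ≤ r' → r' < R → 0 ≤ c' → c' < C →
        gget ((PySem.List.pyRange 0 (m : Int)).foldl
            (fun t c => gset t r c (gget graph r c)) t) r' c' =
          if r' = r ∧ c' < (m : Int) then gget graph r' c' else gget t r' c' := by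
  intro m
  induction m with
  | zero =>
    intro t hm ht
    rw [show ((0 : Nat) : Int) = 0 by norm_num, PySem.List.pyRange_one_eq_nil le_rfl]
    refine ⟨ht, ?_⟩
    intro r' c' h1 h2 h3 h4
    rw [if_neg (by push Not; intro _; omega)]
    rfl
  | succ m ih =>
    intro t hm ht
    obtain ⟨ihS, ihG⟩ := ih t (by omega) ht
    rw [show ((m + 1 : Nat) : Int) = (m : Int) + 1 by push_cast; ring,
      PySem.List.pyRange_one_succ_right (by omega), List.foldl_append,
      List.foldl_cons, List.foldl_nil]
    have hmC : (m : Int) < C := by omega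
    refine ⟨pvShape_gset _ _ _ ihS hr hrR (by omega), ?_⟩
    intro r' c' h1 h2 h3 h4
    rw [gget_gset _ _ _ _ _ ihS ⟨hr, hrR, Int.natCast_nonneg m, hmC⟩ ⟨h1, h2, h3, h4⟩]
    rw [ihG r' c' h1 h2 h3 h4]
    by_cases hrr : r' = r
    · by_cases hcm : c' = (m : Int)
      · rw [if_pos ⟨hrr, hcm⟩, if_pos ⟨hrr, by omega⟩, hrr, hcm]
      · rw [if_neg (fun hx => hcm hx.2)]
        by_cases hlt : c' < (m : Int)
        · rw [if_pos ⟨hrr, hlt⟩, if_pos ⟨hrr, by omega⟩]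
        · rw [if_neg (fun hx => hlt hx.2),
            if_neg (by intro hx; exact absurd hx.2 (by omega))]
    · rw [if_neg (fun hx => hrr hx.1), if_neg (fun hx => hrr hx.1),
        if_neg (fun hx => hrr hx.1)]

theorem copy_eq {R C : Int} (graph t : List (List Int)) (hC : 0 ≤ C)
    (ht : pvShape t R C) (hgr : pvShape graph R C) :
    (PySem.List.pyRange 0 R).foldl
      (fun t r => (PySem.List.pyRange 0 C).foldl
        (fun t c => gset t r c (gget graph r c)) t) t = graph := by
  have aux : ∀ (k : Nat) (t : List (List Int)), (k : Int) ≤ R → pvShape t R C →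
      pvShape ((PySem.List.pyRange 0 (k : Int)).foldl
        (fun t r => (PySem.List.pyRange 0 C).foldl
          (fun t c => gset t r c (gget graph r c)) t) t) R C ∧
      ∀ r' c' : Int, 0 ≤ r' → r' < R → 0 ≤ c' → c' < C →
        gget ((PySem.List.pyRange 0 (k : Int)).foldl
            (fun t r => (PySem.List.pyRange 0 C).foldl
              (fun t c => gset t r c (gget graph r c)) t) t) r' c' =
          if r' < (k : Int) then gget graph r' c' else gget t r' c' := by
    intro k
    induction k with
    | zero =>
      intro t hk ht
      rw [show ((0 : Nat) : Int) = 0 by norm_num, PySem.List.pyRange_one_eq_nil le_rfl]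
      refine ⟨ht, ?_⟩
      intro r' c' h1 h2 h3 h4
      rw [if_neg (by omega)]
      rfl
    | succ k ih =>
      intro t hk ht
      obtain ⟨ihS, ihG⟩ := ih t (by omega) ht
      rw [show ((k + 1 : Nat) : Int) = (k : Int) + 1 by push_cast; ring,
        PySem.List.pyRange_one_succ_right (by omega), List.foldl_append,
        List.foldl_cons, List.foldl_nil]
      have hrow := copy_row (R := R) (C := C) graph (k : Int) (by omega) (by omega) C.toNat
      rw [show ((C.toNat : Nat) : Int) = C by omega] at hrow
      obtain ⟨rowS, rowG⟩ := hrow _ le_rfl ihS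
      refine ⟨rowS, ?_⟩
      intro r' c' h1 h2 h3 h4
      rw [rowG r' c' h1 h2 h3 h4, ihG r' c' h1 h2 h3 h4]
      by_cases hrk : r' = (k : Int)
      · rw [if_pos ⟨hrk, h4⟩, if_pos (show r' < (k : Int) + 1 by omega)]
      · rw [if_neg (fun hx => hrk hx.1)]
        by_cases hlt : r' < (k : Int)
        · rw [if_pos hlt, if_pos (show r' < (k : Int) + 1 by omega)]
        · rw [if_neg hlt, if_neg (show ¬ r' < (k : Int) + 1 by omega)]
  have hR0 : 0 ≤ R := ht.1 ▸ Int.natCast_nonneg t.length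
  have haux := aux R.toNat t (by omega) ht
  rw [show ((R.toNat : Nat) : Int) = R by omega] at haux
  obtain ⟨hS, hG⟩ := haux
  apply pv_grid_ext hS hgr
  intro r c h1 h2 h3 h4
  rw [hG r c h1 h2 h3 h4, if_pos h2]

theorem diffusionA_eq {R C : Int} (t purifier : List (List Int))
    (hR : 0 ≤ R) (hC : 0 ≤ C) (ht : pvShape t R C)
    (h00 : 0 ≤ PySem.List.pyGetD (PySem.List.pyGetD purifier 0 []) 0 0)
    (h01 : PySem.List.pyGetD (PySem.List.pyGetD purifier 0 []) 0 0 < R)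
    (h02 : 0 ≤ PySem.List.pyGetD (PySem.List.pyGetD purifier 0 []) 1 0)
    (h03 : PySem.List.pyGetD (PySem.List.pyGetD purifier 0 []) 1 0 < C)
    (h10 : 0 ≤ PySem.List.pyGetD (PySem.List.pyGetD purifier 1 []) 0 0)
    (h11 : PySem.List.pyGetD (PySem.List.pyGetD purifier 1 []) 0 0 < R)
    (h12 : 0 ≤ PySem.List.pyGetD (PySem.List.pyGetD purifier 1 []) 1 0)
    (h13 : PySem.List.pyGetD (PySem.List.pyGetD purifier 1 []) 1 0 < C) :
    diffusionA R C t purifier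
      = diffuseB R C t (PySem.List.pyGetD purifier 0 []) (PySem.List.pyGetD purifier 1 []) := by
  unfold diffusionA diffuseB
  simp only []
  refine Eq.trans (copy_eq _ _ hC ht ?_) ?_
  · -- the scattered grid of A is R×C-shaped
    refine List.foldlRecOn (motive := fun g => pvShape g R C) _ _ ?_ ?_
    · exact pvShape_gset _ _ _ (pvShape_gset _ _ _ (pvShape_base R C hR hC) h00 h01 h02)
        h10 h11 h12
    · intro acc hacc cr hcr
      have hcrb := mem_pyRange' hcr
      refine List.foldlRecOn (motive := fun g => pvShape g R C) _ _ hacc ?_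
      intro acc2 hacc2 cc hcc
      have hccb := mem_pyRange' hcc
      split_ifs with hv
      · exact hacc2
      · have hst : ∀ (l : List (Int × Int)) (st : List (List Int) × Int),
            pvShape st.1 R C →
            pvShape ((l.foldl (fun st d =>
              if ¬(0 ≤ cr + d.1 ∧ cr + d.1 < R ∧ 0 ≤ cc + d.2 ∧ cc + d.2 < C) then st
              else if purifier.any (pyTupleEqList (cr + d.1, cc + d.2)) then st
              else (gset st.1 (cr + d.1) (cc + d.2)
                (gget st.1 (cr + d.1) (cc + d.2) + PySem.Int.floordiv (gget t cr cc) 5),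
                st.2 + 1)) st)).1 R C := by
          intro l
          induction l with
          | nil => intro st h; exact h
          | cons d rest ihl =>
            intro st h
            rw [List.foldl_cons]
            apply ihl
            split_ifs with hb hm <;>
              first
                | exact h
                | (refine pvShape_gset _ _ _ h ?_ ?_ ?_ <;> omega)
        exact pvShape_gset _ _ _ (hst _ _ hacc2) hcrb.1 hcrb.2 hccb.1
  · -- A's scatter loop computes the same grid as B's
    refine PySem.List.foldl_congr_mem' _ _ _ _ ?_
    intro cr hcr acc
    refine PySem.List.foldl_congr_mem' _ _ _ _ ?_
    intro cc hcc acc2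
    by_cases hv : gget t cr cc ≤ 0
    · rw [if_pos hv, if_neg (not_lt.mpr hv)]
    · have hv' : 0 < gget t cr cc := not_le.mp hv
      rw [if_neg hv, if_pos hv']
      simp only [List.foldl_cons, List.foldl_nil, List.filter_cons, List.filter_nil,
        any_tupleEqList_false, Bool.false_eq_true, if_false, decide_eq_true_eq, ite_not]
      split_ifs <;>
        norm_num [List.map_cons, List.map_nil, List.foldl_cons, List.foldl_nil,
          List.length_cons, List.length_nil]

-- ---- B's per-step shape ----

theorem pvShape_diffuseB {R C : Int} (g : List (List Int)) (p0 p1 : List Int)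
    (hR : 0 ≤ R) (hC : 0 ≤ C)
    (h00 : 0 ≤ PySem.List.pyGetD p0 0 0) (h01 : PySem.List.pyGetD p0 0 0 < R)
    (h02 : 0 ≤ PySem.List.pyGetD p0 1 0) (h03 : PySem.List.pyGetD p0 1 0 < C)
    (h10 : 0 ≤ PySem.List.pyGetD p1 0 0) (h11 : PySem.List.pyGetD p1 0 0 < R)
    (h12 : 0 ≤ PySem.List.pyGetD p1 1 0) (h13 : PySem.List.pyGetD p1 1 0 < C) :
    pvShape (diffuseB R C g p0 p1) R C := by
  unfold diffuseB
  simp only []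
  refine List.foldlRecOn (motive := fun g => pvShape g R C) _ _ ?_ ?_
  · exact pvShape_gset _ _ _ (pvShape_gset _ _ _ (pvShape_base R C hR hC) h00 h01 h02)
      h10 h11 h12
  · intro acc hacc r hr
    have hrb := mem_pyRange' hr
    refine List.foldlRecOn (motive := fun g => pvShape g R C) _ _ hacc ?_
    intro acc2 hacc2 c hc
    have hcb := mem_pyRange' hc
    split_ifs with hv
    · refine pvShape_gset _ _ _ ?_ hrb.1 hrb.2 hcb.1
      refine List.foldlRecOn (motive := fun g => pvShape g R C) _ _ hacc2 ?_
      intro g2 hg2 q hq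
      rw [List.mem_map] at hq
      obtain ⟨ab, hab, rfl⟩ := hq
      rw [List.mem_filter] at hab
      have hcond := of_decide_eq_true hab.2
      exact pvShape_gset _ _ _ hg2 hcond.1 hcond.2.1 hcond.2.2.1
    · exact hacc2

-- ---- one simulated step: A's diffusion+walks equal B's diffusion+ring shifts ----

theorem step_eq {R C : Int} (purifier g : List (List Int)) (hC : 2 ≤ C)
    (hr0a : 1 ≤ PySem.List.pyGetD (PySem.List.pyGetD purifier 0 []) 0 0)
    (hr0b : PySem.List.pyGetD (PySem.List.pyGetD purifier 0 []) 0 0 < R)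
    (hr1a : 0 ≤ PySem.List.pyGetD (PySem.List.pyGetD purifier 1 []) 0 0)
    (hr1b : PySem.List.pyGetD (PySem.List.pyGetD purifier 1 []) 0 0 ≤ R - 2)
    (hc0a : 0 ≤ PySem.List.pyGetD (PySem.List.pyGetD purifier 0 []) 1 0)
    (hc0b : PySem.List.pyGetD (PySem.List.pyGetD purifier 0 []) 1 0 < C)
    (hc1a : 0 ≤ PySem.List.pyGetD (PySem.List.pyGetD purifier 1 []) 1 0)
    (hc1b : PySem.List.pyGetD (PySem.List.pyGetD purifier 1 []) 1 0 < C)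
    (hg : pvShape g R C) :
    purifyA R C (diffusionA R C g purifier) purifier =
      shiftB (shiftB (diffuseB R C g (PySem.List.pyGetD purifier 0 [])
          (PySem.List.pyGetD purifier 1 []))
        (ringUp R C (PySem.List.pyGetD (PySem.List.pyGetD purifier 0 []) 0 0)))
        (ringDown R C (PySem.List.pyGetD (PySem.List.pyGetD purifier 1 []) 0 0)) := by
  have hR : 0 ≤ R := by omega
  have hGS : pvShape (diffuseB R C g (PySem.List.pyGetD purifier 0 [])
      (PySem.List.pyGetD purifier 1 [])) R C :=
    pvShape_diffuseB g _ _ hR (by omega) (by omega) hr0b hc0a hc0b hr1a (by omega) hc1a hc1b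
  have hG2 : pvShape (shiftB (diffuseB R C g (PySem.List.pyGetD purifier 0 [])
      (PySem.List.pyGetD purifier 1 []))
      (ringUp R C (PySem.List.pyGetD (PySem.List.pyGetD purifier 0 []) 0 0))) R C :=
    pvShape_shiftB _ _ (ringUp_nodup hr0a hC) (ringUp_inR hr0a hr0b hC) hGS
  unfold purifyA
  simp only []
  rw [diffusionA_eq g purifier hR (by omega) hg (by omega) hr0b hc0a hc0b hr1a (by omega)
    hc1a hc1b]
  rw [purify_up _ hr0a hr0b hC,
    ← shiftB_eq _ _ (ringUp_nodup hr0a hC) (ringUp_inR hr0a hr0b hC) hGS]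
  rw [purify_down _ hr1a hr1b hC,
    ← shiftB_eq _ _ (ringDown_nodup hr1a hr1b hC) (ringDown_inR hr1a hr1b hC) hG2]

theorem pv_fold_inv {α β : Type} (P : α → Prop) (f h : α → β → α) (l : List β) :
    ∀ init : α, P init → (∀ a b, P a → f a b = h a b) → (∀ a b, P a → P (h a b)) →
      l.foldl f init = l.foldl h init ∧ P (l.foldl h init) := by
  induction l with
  | nil => intro init h0 _ _; exact ⟨rfl, h0⟩
  | cons x xs ih =>
    intro init h0 hfh hp
    rw [List.foldl_cons, List.foldl_cons, hfh init x h0]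
    exact ih (h init x) (hp init x h0) hfh hp

-- ===== VERDICT =====
theorem solution_spec : Claim_equal_solution := by
  intro R C T target purifier _ hpre
  unfold Spec_solution solution solution_alt
  simp only []
  rw [List.map_id']
  rcases hpre with ⟨hT, _⟩ | ⟨hlen, hrows, hC, hplen, hp0len, hp1len, hr0a, hr0b, hr1a, hr1b,
      hc0a, hc0b, hc1a, hc1b⟩
  · -- T ≤ 0: no step runs; both report 2 plus the row sums of the untouched grid
    rw [PySem.List.pyRange_one_eq_nil hT]
    simp only [List.foldl_nil]
    exact PySem.List.foldl_add _ _ 2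
  · have b0 : PySem.List.pyGetD purifier 0 [] = purifier.getD 0 [] :=
      PySem.List.pyGetD_zero _ _
    have b1 : PySem.List.pyGetD purifier 1 [] = purifier.getD 1 [] :=
      PySem.List.pyGetD_ofNat' purifier 1 []
    have br0 : PySem.List.pyGetD (PySem.List.pyGetD purifier 0 []) 0 0
        = (purifier.getD 0 []).getD 0 0 := by rw [b0, PySem.List.pyGetD_zero]
    have br1 : PySem.List.pyGetD (PySem.List.pyGetD purifier 1 []) 0 0
        = (purifier.getD 1 []).getD 0 0 := by rw [b1, PySem.List.pyGetD_zero]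
    have bc0 : PySem.List.pyGetD (PySem.List.pyGetD purifier 0 []) 1 0
        = (purifier.getD 0 []).getD 1 0 := by
      rw [b0, PySem.List.pyGetD_ofNat']
    have bc1 : PySem.List.pyGetD (PySem.List.pyGetD purifier 1 []) 1 0
        = (purifier.getD 1 []).getD 1 0 := by
      rw [b1, PySem.List.pyGetD_ofNat']
    rw [← br0] at hr0a hr0b
    rw [← br1] at hr1a hr1b
    rw [← bc0] at hc0a hc0b
    rw [← bc1] at hc1a hc1b
    have hfold := pv_fold_inv (fun g => pvShape g R C)
      (fun g _ => purifyA R C (diffusionA R C g purifier) purifier)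
      (fun g _ =>
        shiftB
          (shiftB (diffuseB R C g (PySem.List.pyGetD purifier 0 [])
              (PySem.List.pyGetD purifier 1 []))
            (ringUp R C (PySem.List.pyGetD (PySem.List.pyGetD purifier 0 []) 0 0)))
          (ringDown R C (PySem.List.pyGetD (PySem.List.pyGetD purifier 1 []) 0 0)))
      (PySem.List.pyRange 0 T) target ⟨hlen, hrows⟩
      (fun g b hg => step_eq purifier g hC hr0a hr0b hr1a hr1b hc0a hc0b hc1a hc1b hg)
      (fun g b hg => by
        have hR : 0 ≤ R := by omega
        have hGS := pvShape_diffuseB (R := R) (C := C) g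
          (PySem.List.pyGetD purifier 0 []) (PySem.List.pyGetD purifier 1 [])
          hR (by omega) (by omega) hr0b hc0a hc0b hr1a (by omega) hc1a hc1b
        exact pvShape_shiftB _ _
          (ringDown_nodup hr1a hr1b hC) (ringDown_inR hr1a hr1b hC)
          (pvShape_shiftB _ _ (ringUp_nodup hr0a hC)
            (ringUp_inR hr0a hr0b hC) hGS))
    rw [hfold.1]
    exact PySem.List.foldl_add _ _ 2
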